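-- pv_equiv track=rewrite | github.com/AQLDARK/Heart-Disease-Risk-Prediction | ml/recommendations.py | format_recommendations_for_display
-- ===== SOURCE A (Python) =====
-- def format_recommendations_for_display(recommendations):
--     """
--     Format recommendations into a readable string for Streamlit display.
--
--     Args:
--         recommendations: Dictionary from generate_clinical_recommendations
--
--     Returns:
--         Formatted string for display
--     """
--
--     output = []
--
--     # Key Findings
--     if recommendations.get("key_findings"):
--         output.append("### 🔍 Key Findings")
--         for finding in recommendations["key_findings"]:
--             output.append(f"- {finding}")
--         output.append("")
--
--     # Primary Recommendations
--     if recommendations.get("primary_recommendations"):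
--         output.append("### 📋 Recommended Actions")
--         for rec in recommendations["primary_recommendations"]:
--             output.append(f"- {rec}")
--         output.append("")
--
--     # Lifestyle Modifications
--     if recommendations.get("lifestyle_modifications"):
--         output.append("### 🏃 Lifestyle Modifications")
--         for mod in recommendations["lifestyle_modifications"]:
--             output.append(f"- {mod}")
--         output.append("")
--
--     # Monitoring Guidelines
--     if recommendations.get("monitoring_guidelines"):
--         output.append("### 📅 Monitoring Guidelines")
--         for guideline in recommendations["monitoring_guidelines"]:
--             output.append(f"- {guideline}")
--         output.append("")
--
--     # Warning Signs
--     if recommendations.get("warning_signs"):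
--         output.append("### ⚠️ Warning Signs - Seek Emergency Care If You Experience:")
--         for sign in recommendations["warning_signs"]:
--             output.append(f"- {sign}")
--         output.append("")
--
--     return "\n".join(output)
-- ===== SOURCE B (Python) =====
-- SECTIONS = [
--     ("key_findings", "### 🔍 Key Findings"),
--     ("primary_recommendations", "### 📋 Recommended Actions"),
--     ("lifestyle_modifications", "### 🏃 Lifestyle Modifications"),
--     ("monitoring_guidelines", "### 📅 Monitoring Guidelines"),
--     ("warning_signs", "### ⚠️ Warning Signs - Seek Emergency Care If You Experience:"),
-- ]
--
--
-- def format_recommendations_for_display(recommendations):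
--     # Each present section becomes ONE pre-assembled block string
--     # "header\n- item1\n- item2...\n"; joining the blocks with "\n"
--     # reproduces the blank separator line between sections.
--     def block(header, items):
--         text = header
--         for item in items:
--             text += "\n- " + item
--         return text + "\n"
--
--     def go(sections):
--         if not sections:
--             return []
--         (key, header) = sections[0]
--         rest = go(sections[1:])
--         items = recommendations.get(key)
--         return [block(header, items)] + rest if items else rest
--
--     return "\n".join(go(SECTIONS))
-- ===== Notes on version B (the rewrite author's own statement) =====
-- stated objective: alternative
-- what changed: Instead of accumulating one flat list of display lines through five unrolled if-blocks, B recurses over a section-descriptor table and assembles each present section into a single block string (header plus '\n- item' pieces plus trailing '\n') by string concatenation, then joins the block strings with '\n'; the blank separator line emerges from the join rather than from an appended empty line.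
import Mathlib
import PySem

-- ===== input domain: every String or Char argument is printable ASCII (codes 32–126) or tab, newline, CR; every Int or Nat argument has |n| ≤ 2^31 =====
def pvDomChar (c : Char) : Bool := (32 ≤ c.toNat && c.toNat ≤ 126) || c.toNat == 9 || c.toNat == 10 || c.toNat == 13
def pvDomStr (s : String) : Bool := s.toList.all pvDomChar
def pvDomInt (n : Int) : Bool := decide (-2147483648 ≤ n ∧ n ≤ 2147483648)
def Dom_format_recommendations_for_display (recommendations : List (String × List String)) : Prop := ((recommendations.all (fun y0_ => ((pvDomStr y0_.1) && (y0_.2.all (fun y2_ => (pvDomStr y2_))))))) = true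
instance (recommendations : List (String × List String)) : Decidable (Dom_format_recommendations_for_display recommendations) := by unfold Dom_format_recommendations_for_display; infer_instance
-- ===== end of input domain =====

-- B recurses over a section-descriptor table, assembling each present section into ONE block
-- string by concatenation and joining the blocks, instead of A's five unrolled line-list blocks ("alternative").

-- ===== PORT A =====
-- `recommendations.get(k)` truthy test + `recommendations[k]`: with list values, truthy ↔ present and nonempty,
-- and the value then equals `getD k []`.
def format_recommendations_for_display (recommendations : List (String × List String)) : String :=
  let d := PySem.Dict.mk recommendations
  let output : List String := []
  -- Key Findings
  let output := if d.getD "key_findings" [] ≠ [] then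
      ((d.getD "key_findings" []).foldl (fun o finding => o ++ ["- " ++ finding])
        (output ++ ["### 🔍 Key Findings"])) ++ [""]
    else output
  -- Primary Recommendations
  let output := if d.getD "primary_recommendations" [] ≠ [] then
      ((d.getD "primary_recommendations" []).foldl (fun o rec_ => o ++ ["- " ++ rec_])
        (output ++ ["### 📋 Recommended Actions"])) ++ [""]
    else output
  -- Lifestyle Modifications
  let output := if d.getD "lifestyle_modifications" [] ≠ [] then
      ((d.getD "lifestyle_modifications" []).foldl (fun o m => o ++ ["- " ++ m])
        (output ++ ["### 🏃 Lifestyle Modifications"])) ++ [""]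
    else output
  -- Monitoring Guidelines
  let output := if d.getD "monitoring_guidelines" [] ≠ [] then
      ((d.getD "monitoring_guidelines" []).foldl (fun o g => o ++ ["- " ++ g])
        (output ++ ["### 📅 Monitoring Guidelines"])) ++ [""]
    else output
  -- Warning Signs
  let output := if d.getD "warning_signs" [] ≠ [] then
      ((d.getD "warning_signs" []).foldl (fun o s => o ++ ["- " ++ s])
        (output ++ ["### ⚠️ Warning Signs - Seek Emergency Care If You Experience:"])) ++ [""]
    else output
  PySem.Str.join "\n" output

-- ===== PORT B =====
def pvSections : List (String × String) :=
  [("key_findings", "### 🔍 Key Findings"),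
   ("primary_recommendations", "### 📋 Recommended Actions"),
   ("lifestyle_modifications", "### 🏃 Lifestyle Modifications"),
   ("monitoring_guidelines", "### 📅 Monitoring Guidelines"),
   ("warning_signs", "### ⚠️ Warning Signs - Seek Emergency Care If You Experience:")]

-- Source B's `block`: header, then "\n- item" per item by string concatenation, then a trailing "\n"
def pvBlock (header : String) (items : List String) : String :=
  (items.foldl (fun text item => text ++ ("\n- " ++ item)) header) ++ "\n"

-- Source B's recursive `go` over the section table (d captured like the closure captures `recommendations`)
def pvGo (d : PySem.Dict String (List String)) : List (String × String) → List String
  | [] => []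
  | (key, header) :: sections =>
    let rest := pvGo d sections
    let items := d.getD key []
    if items ≠ [] then pvBlock header items :: rest else rest

def format_recommendations_for_display_alt (recommendations : List (String × List String)) : String :=
  PySem.Str.join "\n" (pvGo (PySem.Dict.mk recommendations) pvSections)

-- ===== PRECONDITION & SPEC =====
def Spec_format_recommendations_for_display (recommendations : List (String × List String)) (out : String) : Prop := out = format_recommendations_for_display_alt recommendations
instance (recommendations : List (String × List String)) (out : String) : Decidable (Spec_format_recommendations_for_display recommendations out) := by unfold Spec_format_recommendations_for_display; infer_instance

-- ===== CLAIM (what is proved, stated in full; the proofs are below) =====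
def Claim_equal_format_recommendations_for_display : Prop := ∀ (recommendations : List (String × List String)), Dom_format_recommendations_for_display recommendations → Spec_format_recommendations_for_display recommendations (format_recommendations_for_display recommendations)

-- ===== LEMMAS AND PROOFS =====

-- A's flat list of display lines, recast as a recursion over the same section table
def flatLines (d : PySem.Dict String (List String)) : List (String × String) → List String
  | [] => []
  | (key, header) :: sections =>
    (if d.getD key [] ≠ [] then header :: (d.getD key []).map (fun x => "- " ++ x) ++ [""] else [])
      ++ flatLines d sections

theorem foldl_dash_append (l : List String) (o : List String) :
    l.foldl (fun o x => o ++ ["- " ++ x]) o = o ++ l.map (fun x => "- " ++ x) := by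
  induction l generalizing o with
  | nil => simp
  | cons h t ih => simp [List.foldl, ih]

theorem A_eq_flat (recommendations : List (String × List String)) :
    format_recommendations_for_display recommendations =
      PySem.Str.join "\n" (flatLines (PySem.Dict.mk recommendations) pvSections) := by
  unfold format_recommendations_for_display
  simp only [foldl_dash_append, flatLines, pvSections]
  split_ifs <;> simp

theorem flat_nil_iff (d : PySem.Dict String (List String)) (sects : List (String × String)) :
    flatLines d sects = [] ↔ pvGo d sects = [] := by
  induction sects with
  | nil => simp [flatLines, pvGo]
  | cons kh rest ih =>
    obtain ⟨k, h⟩ := kh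
    by_cases hne : d.getD k [] ≠ [] <;> simp [flatLines, pvGo, hne, ih]

-- join with "\n" of a nonempty list, as head ++ flatten of '\n'-prefixed tails
theorem jn_formula (a : List Char) (L : List (List Char)) :
    PySem.Chars.join ['\n'] (a :: L) = a ++ (L.map (fun x => '\n' :: x)).flatten := by
  induction L generalizing a with
  | nil => simp [PySem.Chars.join_singleton]
  | cons b t ih => simp [PySem.Chars.join_cons_cons, ih]

theorem flatten_nl (L : List (List Char)) :
    (L.map (fun x => '\n' :: x)).flatten =
      if L = [] then [] else '\n' :: PySem.Chars.join ['\n'] L := by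
  cases L with
  | nil => rfl
  | cons a t => simp [jn_formula]

theorem block_toList (items : List String) (header : String) :
    (pvBlock header items).toList =
      PySem.Chars.join ['\n']
        (header.toList :: (items.map (fun i => '-' :: ' ' :: i.toList) ++ [[]])) := by
  induction items generalizing header with
  | nil =>
    simp [pvBlock, jn_formula]
  | cons i rest ih =>
    have step : pvBlock header (i :: rest) = pvBlock (header ++ ("\n- " ++ i)) rest := rfl
    rw [step, ih, jn_formula, jn_formula]
    simp [String.toList_append]

theorem main_join (d : PySem.Dict String (List String)) (sects : List (String × String)) :
    PySem.Chars.join ['\n'] ((flatLines d sects).map String.toList) =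
      PySem.Chars.join ['\n'] ((pvGo d sects).map String.toList) := by
  induction sects with
  | nil => rfl
  | cons kh rest ih =>
    obtain ⟨k, h⟩ := kh
    by_cases hne : d.getD k [] = []
    · simp only [flatLines, pvGo, hne, ne_eq, not_true_eq_false, if_false, List.nil_append]
      exact ih
    · have hT : (List.map (fun s : String => '\n' :: s.toList) (flatLines d rest)).flatten =
          (List.map (fun s : String => '\n' :: s.toList) (pvGo d rest)).flatten := by
        have e1 := flatten_nl ((flatLines d rest).map String.toList)
        have e2 := flatten_nl ((pvGo d rest).map String.toList)
        simp only [List.map_map, Function.comp_def, List.map_eq_nil_iff] at e1 e2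
        by_cases hr : flatLines d rest = []
        · simp [hr, (flat_nil_iff d rest).mp hr]
        · have hg : pvGo d rest ≠ [] := fun h' => hr ((flat_nil_iff d rest).mpr h')
          rw [e1, e2, if_neg hr, if_neg hg, ih]
      have hdash : ∀ x : String, ("- " ++ x).toList = '-' :: ' ' :: x.toList := by
        intro x; rw [String.toList_append]; rfl
      simp only [flatLines, pvGo, hne, ne_eq, not_false_eq_true, if_true, List.cons_append,
        List.append_assoc, List.map_cons, List.map_append]
      rw [jn_formula, jn_formula, block_toList, jn_formula]
      simp [List.flatten_append, List.map_map, Function.comp_def, hdash, hT]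
-- ===== VERDICT (by name: the statement is the Claim_ definition above) =====
theorem format_recommendations_for_display_spec : Claim_equal_format_recommendations_for_display := by
  intro recs _
  unfold Spec_format_recommendations_for_display format_recommendations_for_display_alt
  rw [A_eq_flat]
  apply String.toList_inj.mp
  simpa [PySem.Str.toList_join] using main_join (PySem.Dict.mk recs) pvSections
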